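-- pv_equiv track=rewrite | github.com/yeling/leetcode | leetcode2023b.py | adventureCamp
-- ===== SOURCE A (Python) =====
-- from typing import List
--
-- def adventureCamp(expeditions: List[str]) -> int:
--     cache = set()
--     ans = 0
--     pos = -1
--     n = len(expeditions)
--     temp = expeditions[0].split("->")
--     for v in temp:
--         cache.add(v)
--     for i in range(1,n):
--         cnt = 0
--         temp = expeditions[i].split("->")
--
--         for v in temp:
--             if len(v) == 0:
--                 continue
--             if v not in cache:
--                 cnt += 1
--                 cache.add(v)
--         if cnt > ans:
--             ans = cnt
--             pos = i
--
--     return pos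
-- ===== SOURCE B (Python) =====
-- from typing import List
--
-- def adventureCamp(expeditions: List[str]) -> int:
--     # Map each place to the index of the expedition that first mentions it.
--     first_seen = {}
--     for i, row in enumerate(expeditions):
--         for tok in row.split("->"):
--             if tok and tok not in first_seen:
--                 first_seen[tok] = i
--     # How many new places each expedition contributed.
--     counts = {}
--     for idx in first_seen.values():
--         counts[idx] = counts.get(idx, 0) + 1
--     # Lowest index with a count strictly above the running best (0) wins.
--     best, pos = 0, -1
--     for i in range(1, len(expeditions)):
--         c = counts.get(i, 0)
--         if c > best:
--             best, pos = c, i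
--     return pos
-- ===== Notes on version B (the rewrite author's own statement) =====
-- stated objective: alternative
-- what changed: A's single fused loop threading a seen-set and running best/pos is replaced by a first_seen dict mapping each place to the expedition that introduced it, a per-index counter over its values, and a separate final scan for the lowest index with a strictly larger count; Pre_ excludes only the empty list, on which A raises IndexError.
import Mathlib
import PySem

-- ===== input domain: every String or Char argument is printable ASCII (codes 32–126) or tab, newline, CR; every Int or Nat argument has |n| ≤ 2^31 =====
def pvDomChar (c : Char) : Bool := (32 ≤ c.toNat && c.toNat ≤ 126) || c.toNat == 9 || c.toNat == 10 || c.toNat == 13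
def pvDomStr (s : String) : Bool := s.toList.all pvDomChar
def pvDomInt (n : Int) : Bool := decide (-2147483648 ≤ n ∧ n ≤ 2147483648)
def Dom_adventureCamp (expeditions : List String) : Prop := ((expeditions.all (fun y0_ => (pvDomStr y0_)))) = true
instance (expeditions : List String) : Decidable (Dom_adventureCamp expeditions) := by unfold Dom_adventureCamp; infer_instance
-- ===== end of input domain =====

-- B replaces A's fused cache/argmax loop by a first-seen dict + per-index counter + final scan (objective: alternative decomposition).
-- A raises IndexError on [] (excluded by Pre_; B returns -1 there). Neither version mutates its argument.

-- ===== PORT A =====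
-- str.split("->"): split? is none only for an empty separator, so .getD [] is exact here
def advSplit (s : String) : List String := (PySem.Str.split? s "->").getD []

-- body of A's inner token loop, state (cnt, cache)
def advInner (st : Int × PySem.Set String) (v : String) : Int × PySem.Set String :=
  if PySem.Str.len v == 0 then st
  else if st.2.contains v then st
  else (st.1 + 1, PySem.Set.add st.2 v)

def adventureCamp (expeditions : List String) : Int :=
  match PySem.List.pyGet? expeditions 0 with
  | none => 0   -- Python raises IndexError here; excluded by Pre_
  | some row0 =>
    let cache : PySem.Set String := (advSplit row0).foldl (fun c v => PySem.Set.add c v) PySem.Set.empty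
    let n : Int := expeditions.length
    let res := (PySem.List.pyRange 1 n).foldl
      (fun (st : PySem.Set String × Int × Int) i =>
        let r := (advSplit (PySem.List.pyGetD expeditions i "")).foldl advInner (0, st.1)
        if r.1 > st.2.1 then (r.2, r.1, i) else (r.2, st.2.1, st.2.2))
      (cache, 0, -1)
    res.2.2

-- ===== PORT B =====
def adventureCamp_alt (expeditions : List String) : Int :=
  let first_seen : PySem.Dict String Int :=
    (PySem.List.enumerate expeditions).foldl
      (fun d p =>
        (advSplit p.2).foldl
          (fun d tok =>
            if (tok != "") && !(d.contains tok) then d.insert tok p.1 else d) d)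
      PySem.Dict.empty
  let counts : PySem.Dict Int Int :=
    first_seen.values.foldl (fun c idx => c.insert idx (c.getD idx 0 + 1)) PySem.Dict.empty
  let res := (PySem.List.pyRange 1 (expeditions.length : Int)).foldl
    (fun (bp : Int × Int) i =>
      let c := counts.getD i 0
      if c > bp.1 then (c, i) else bp)
    (0, -1)
  res.2

-- ===== PRECONDITION & SPEC =====
-- Pre_ excludes only the empty list, on which A raises IndexError at expeditions[0].
def Pre_adventureCamp (expeditions : List String) : Prop := expeditions ≠ []
instance (expeditions : List String) : Decidable (Pre_adventureCamp expeditions) := by unfold Pre_adventureCamp; infer_instance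
def pvWitness_adventureCamp : List String := ["a->b->c", "c->d", "e"]

def Spec_adventureCamp (expeditions : List String) (out : Int) : Prop := out = adventureCamp_alt expeditions
instance (expeditions : List String) (out : Int) : Decidable (Spec_adventureCamp expeditions out) := by unfold Spec_adventureCamp; infer_instance

-- ===== CLAIM (what is proved, stated in full; the proofs are below) =====
def Claim_equal_adventureCamp : Prop := ∀ (expeditions : List String), Dom_adventureCamp expeditions → Pre_adventureCamp expeditions → Spec_adventureCamp expeditions (adventureCamp expeditions)

-- ===== LEMMAS AND PROOFS =====

-- model: result of one row of A's inner loop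
def pvStepRow (cache : PySem.Set String) (ts : List String) : Int × PySem.Set String :=
  ts.foldl advInner (0, cache)

-- per-row new-distinct counts of rows processed sequentially from a cache
def pvCnts (cache : PySem.Set String) : List String → List Int
  | [] => []
  | r :: rs => (pvStepRow cache (advSplit r)).1 :: pvCnts (pvStepRow cache (advSplit r)).2 rs

-- the best/pos scan, indices from k
def pvScan : List Int → Int → Int × Int → Int × Int
  | [], _, bp => bp
  | c :: cs, k, bp => pvScan cs (k + 1) (if c > bp.1 then (c, k) else bp)

-- the multiset of first_seen values contributed by rows k, k+1, … with per-row counts cs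
def pvBlocks (k : Int) : List Int → List Int
  | [] => []
  | c :: cs => List.replicate c.toNat k ++ pvBlocks (k + 1) cs


-- B's inner-loop condition test '(tok != "")' agrees with A's 'len(v) == 0' test
theorem pvLenZero (s : String) (h : s ≠ "") : (PySem.Str.len s == 0) = false := by
  simpa [PySem.Str.len_eq] using h

-- inserting a fresh key into a dict matching a cache (off "") keeps it matching the grown cache
theorem pvContainsStep (d : PySem.Dict String Int) (cache : PySem.Set String)
    (h : ∀ t, t ≠ "" → d.contains t = cache.contains t) (tok : String) (i : Int) (t : String)
    (ht : t ≠ "") : (d.insert tok i).contains t = (PySem.Set.add cache tok).contains t := by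
  rw [PySem.Dict.contains_insert, h t ht, Bool.eq_iff_iff, Bool.or_eq_true, beq_iff_eq,
    PySem.Set.contains_iff, PySem.Set.contains_iff, PySem.Set.mem_add]
  tauto

-- one row: B's dict loop appends the fresh non-empty tokens (each valued i), A's cnt counts them,
-- and the dict keeps matching A's cache on every non-empty key
theorem pvRow : ∀ (ts : List String) (i : Int)
    (d : PySem.Dict String Int) (cache : PySem.Set String) (c : Int),
    (∀ t, t ≠ "" → d.contains t = cache.contains t) →
    ∃ newks : List String,
      (ts.foldl (fun d tok => if (tok != "") && !(d.contains tok) then d.insert tok i else d) d).items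
        = d.items ++ newks.map (fun t => (t, i))
      ∧ (ts.foldl advInner (c, cache)).1 = c + newks.length
      ∧ ∀ t, t ≠ "" → (ts.foldl (fun d tok => if (tok != "") && !(d.contains tok) then d.insert tok i else d) d).contains t
             = (ts.foldl advInner (c, cache)).2.contains t := by
  intro ts
  induction ts with
  | nil => intro i d cache c h; exact ⟨[], by simp, by simp, h⟩
  | cons t ts ih =>
    intro i d cache c h
    by_cases hv : t = ""
    · subst hv
      have hcondB : ((("" : String) != "") && !(d.contains "")) = false := by simp
      have hcondA : advInner (c, cache) "" = (c, cache) := by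
        simp [advInner]
      rw [List.foldl_cons, List.foldl_cons, hcondA, if_neg (by rw [hcondB]; exact Bool.false_ne_true)]
      exact ih i d cache c h
    · have hbne : (t != "") = true := by simpa [bne_iff_ne] using hv
      by_cases hmem : cache.contains t = true
      · have hd : d.contains t = true := by rw [h t hv]; exact hmem
        have hcondB : ((t != "") && !(d.contains t)) = false := by
          simp [hd]
        have hcondA : advInner (c, cache) t = (c, cache) := by
          unfold advInner
          rw [if_neg (by rw [pvLenZero t hv]; exact Bool.false_ne_true), if_pos hmem]
        rw [List.foldl_cons, List.foldl_cons, hcondA, if_neg (by rw [hcondB]; exact Bool.false_ne_true)]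
        exact ih i d cache c h
      · have hmem' : cache.contains t = false := by simpa using hmem
        have hd : d.contains t = false := by rw [h t hv]; exact hmem'
        have hcondB : ((t != "") && !(d.contains t)) = true := by
          simp [hd, hbne]
        have hcondA : advInner (c, cache) t = (c + 1, PySem.Set.add cache t) := by
          unfold advInner
          rw [if_neg (by rw [pvLenZero t hv]; exact Bool.false_ne_true),
            if_neg (by rw [hmem']; exact Bool.false_ne_true)]
        rw [List.foldl_cons, List.foldl_cons, hcondA, if_pos hcondB]
        obtain ⟨nk, h1, h2, h3⟩ := ih i (d.insert t i) (PySem.Set.add cache t) (c + 1)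
          (fun u hu => pvContainsStep d cache h t i u hu)
        refine ⟨t :: nk, ?_, ?_, h3⟩
        · rw [h1, PySem.Dict.items_insert_of_not_contains d i hd]
          simp
        · rw [h2, List.length_cons]; push_cast; ring

-- row 0: B records the fresh non-empty tokens, A adds every token (even "") to the cache;
-- the dict matches the grown cache on every non-empty key
theorem pvRow0 : ∀ (ts : List String) (d : PySem.Dict String Int) (cache : PySem.Set String),
    (∀ t, t ≠ "" → d.contains t = cache.contains t) →
    ∃ newks : List String,
      (ts.foldl (fun d tok => if (tok != "") && !(d.contains tok) then d.insert tok (0 : Int) else d) d).items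
        = d.items ++ newks.map (fun t => (t, (0 : Int)))
      ∧ ∀ t, t ≠ "" → (ts.foldl (fun d tok => if (tok != "") && !(d.contains tok) then d.insert tok (0 : Int) else d) d).contains t
             = (ts.foldl (fun c v => PySem.Set.add c v) cache).contains t := by
  intro ts
  induction ts with
  | nil => intro d cache h; exact ⟨[], by simp, h⟩
  | cons t ts ih =>
    intro d cache h
    by_cases hv : t = ""
    · subst hv
      have hcondB : ((("" : String) != "") && !(d.contains "")) = false := by simp
      rw [List.foldl_cons, List.foldl_cons, if_neg (by rw [hcondB]; exact Bool.false_ne_true)]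
      refine ih d (PySem.Set.add cache "") (fun u hu => ?_)
      rw [h u hu, Bool.eq_iff_iff, PySem.Set.contains_iff, PySem.Set.contains_iff,
        PySem.Set.mem_add]
      exact ⟨Or.inl, fun hc => hc.resolve_right hu⟩
    · by_cases hmem : cache.contains t = true
      · have hd : d.contains t = true := by rw [h t hv]; exact hmem
        have hcondB : ((t != "") && !(d.contains t)) = false := by
          simp [hd]
        have hadd : PySem.Set.add cache t = cache :=
          PySem.Set.add_of_mem ((PySem.Set.contains_iff cache t).mp hmem)
        rw [List.foldl_cons, List.foldl_cons, hadd, if_neg (by rw [hcondB]; exact Bool.false_ne_true)]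
        exact ih d cache h
      · have hbne : (t != "") = true := by simpa [bne_iff_ne] using hv
        have hmem' : cache.contains t = false := by simpa using hmem
        have hd : d.contains t = false := by rw [h t hv]; exact hmem'
        have hcondB : ((t != "") && !(d.contains t)) = true := by
          simp [hd, hbne]
        rw [List.foldl_cons, List.foldl_cons, if_pos hcondB]
        obtain ⟨nk, h1, h2⟩ := ih (d.insert t 0) (PySem.Set.add cache t)
          (fun u hu => pvContainsStep d cache h t 0 u hu)
        refine ⟨t :: nk, ?_, h2⟩
        rw [h1, PySem.Dict.items_insert_of_not_contains d 0 hd]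
        simp

-- A's cnt never decreases below its start
theorem pvStep_fst_ge : ∀ (ts : List String) (c : Int) (cache : PySem.Set String),
    c ≤ (ts.foldl advInner (c, cache)).1 := by
  intro ts
  induction ts with
  | nil => intro c cache; simp
  | cons t ts ih =>
    intro c cache
    simp only [List.foldl_cons, advInner]
    split
    · exact ih c cache
    · split
      · exact ih c cache
      · exact le_trans (by omega) (ih (c + 1) (PySem.Set.add cache t))

theorem pvCnts_nonneg : ∀ (rest : List String) (cache : PySem.Set String),
    ∀ x ∈ pvCnts cache rest, 0 ≤ x := by
  intro rest
  induction rest with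
  | nil => intro cache x hx; simp [pvCnts] at hx
  | cons r rs ih =>
    intro cache x hx
    rw [pvCnts, List.mem_cons] at hx
    rcases hx with hx | hx
    · subst hx
      simpa [pvStepRow] using pvStep_fst_ge (advSplit r) 0 cache
    · exact ih _ x hx

theorem pvCnts_length : ∀ (rest : List String) (cache : PySem.Set String),
    (pvCnts cache rest).length = rest.length := by
  intro rest
  induction rest with
  | nil => intro cache; simp [pvCnts]
  | cons r rs ih => intro cache; simp [pvCnts, ih]

-- B's whole dict-building loop over rows k, k+1, …: values grow by pvBlocks
theorem pvOuterB : ∀ (rest : List String) (k : Int) (d : PySem.Dict String Int)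
    (cache : PySem.Set String), (∀ t, t ≠ "" → d.contains t = cache.contains t) →
    ((PySem.List.enumerate rest k).foldl
        (fun d p => (advSplit p.2).foldl
          (fun d tok => if (tok != "") && !(d.contains tok) then d.insert tok p.1 else d) d) d).values
      = d.values ++ pvBlocks k (pvCnts cache rest) := by
  intro rest
  induction rest with
  | nil => intro k d cache h; simp [PySem.List.enumerate_nil, pvCnts, pvBlocks]
  | cons r rs ih =>
    intro k d cache h
    rw [PySem.List.enumerate_cons, List.foldl_cons]
    obtain ⟨nk, h1, h2, h3⟩ := pvRow (advSplit r) k d cache 0 h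
    rw [ih (k + 1) _ (pvStepRow cache (advSplit r)).2 h3]
    have hv : ((advSplit r).foldl
        (fun d tok => if (tok != "") && !(d.contains tok) then d.insert tok k else d) d).values
        = d.values ++ List.replicate nk.length k := by
      show (((advSplit r).foldl
        (fun d tok => if (tok != "") && !(d.contains tok) then d.insert tok k else d) d).items.map (·.2))
        = d.items.map (·.2) ++ List.replicate nk.length k
      rw [h1]
      simp [Function.comp_def]
    rw [hv]
    have hcnt : pvCnts cache (r :: rs)
        = (0 + (nk.length : Int)) :: pvCnts (pvStepRow cache (advSplit r)).2 rs := by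
      simp only [pvCnts, pvStepRow]
      rw [h2]
    rw [hcnt]
    simp only [pvBlocks, zero_add, Int.toNat_natCast]
    rw [List.append_assoc]

-- A's fused loop over rows k, k+1, … projects to the pvScan of the per-row counts
theorem pvOuterA : ∀ (rest : List String) (k : Int) (cache : PySem.Set String) (ans pos : Int),
    ((PySem.List.enumerate rest k).foldl
        (fun (st : PySem.Set String × Int × Int) p =>
          let r := (advSplit p.2).foldl advInner (0, st.1)
          if r.1 > st.2.1 then (r.2, r.1, p.1) else (r.2, st.2.1, st.2.2)) (cache, ans, pos)).2
      = pvScan (pvCnts cache rest) k (ans, pos) := by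
  intro rest
  induction rest with
  | nil => intro k cache ans pos; simp [PySem.List.enumerate_nil, pvCnts, pvScan]
  | cons r rs ih =>
    intro k cache ans pos
    rw [PySem.List.enumerate_cons, List.foldl_cons]
    simp only [pvCnts, pvScan, pvStepRow]
    by_cases hgt : ((advSplit r).foldl advInner (0, cache)).1 > ans
    · rw [if_pos hgt, if_pos hgt]; exact ih (k + 1) _ _ _
    · rw [if_neg hgt, if_neg hgt]; exact ih (k + 1) _ _ _

-- a foldl over range(k, len xs) reading xs[i] is a foldl over enumerate(xs)[k:]
theorem pvRangeEnum {σ : Type} (g : σ → Int → String → σ) :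
    ∀ (rest : List String) (k : Nat) (xs : List String), xs.drop k = rest → ∀ (init : σ),
    (PySem.List.pyRange (k : Int) (xs.length : Int)).foldl
        (fun acc i => g acc i (PySem.List.pyGetD xs i "")) init
      = (PySem.List.enumerate rest (k : Int)).foldl (fun acc p => g acc p.1 p.2) init := by
  intro rest
  induction rest with
  | nil =>
    intro k xs h init
    have hk : xs.length ≤ k := List.drop_eq_nil_iff.mp h
    rw [PySem.List.pyRange_one_eq_nil (by exact_mod_cast hk)]
    simp [PySem.List.enumerate_nil]
  | cons r rs ih =>
    intro k xs h init
    have hk : k < xs.length := by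
      by_contra hc
      rw [List.drop_eq_nil_iff.mpr (by omega)] at h
      simp at h
    have hd := List.drop_eq_getElem_cons hk
    rw [h] at hd
    have hx : xs[k] = r := (List.cons.injEq _ _ _ _ ▸ hd).1.symm
    have hrest : xs.drop (k + 1) = rs := ((List.cons.injEq _ _ _ _ ▸ hd).2).symm
    rw [PySem.List.pyRange_one_cons (by exact_mod_cast hk), List.foldl_cons,
      PySem.List.enumerate_cons, List.foldl_cons,
      PySem.List.pyGetD_eq_getElem xs "" (by positivity) (by exact_mod_cast hk)]
    simp only [Int.toNat_natCast]
    have hcast : ((k : Int) + 1) = ((k + 1 : Nat) : Int) := by push_cast; ring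
    rw [hx, hcast, ih (k + 1) xs hrest]

-- the final scan over range(1, n) with a pointwise value function is pvScan
theorem pvScanFold : ∀ (cs : List Int) (k : Int) (bp : Int × Int) (v : Int → Int),
    (∀ (j : Nat), (h : j < cs.length) → v (k + j) = cs[j]) →
    (PySem.List.pyRange k (k + cs.length)).foldl
        (fun bp i => if v i > bp.1 then (v i, i) else bp) bp = pvScan cs k bp := by
  intro cs
  induction cs with
  | nil => intro k bp v hv; rw [PySem.List.pyRange_one_eq_nil (by simp)]; simp [pvScan]
  | cons c cs ih =>
    intro k bp v hv
    have hend : k + ((c :: cs).length : Int) = (k + 1) + (cs.length : Int) := by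
      rw [List.length_cons]; push_cast; ring
    rw [hend, PySem.List.pyRange_one_cons (by omega), List.foldl_cons]
    have hv0 : v k = c := by simpa using hv 0 (by simp)
    have hstep : (if v k > bp.1 then (v k, k) else bp) = (if c > bp.1 then (c, k) else bp) := by
      rw [hv0]
    rw [hstep]
    simp only [pvScan]
    exact ih (k + 1) _ v (fun j h => by
      have := hv (j + 1) (by simpa using h)
      rw [show (k + 1) + (j : Int) = k + (((j : Nat) + 1 : Nat) : Int) from by push_cast; ring]
      simpa using this)

theorem pvBlocks_count_lt : ∀ (cs : List Int) (k i : Int), i < k →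
    (pvBlocks k cs).count i = 0 := by
  intro cs
  induction cs with
  | nil => intro k i h; simp [pvBlocks]
  | cons c cs ih =>
    intro k i h
    simp only [pvBlocks, List.count_append, List.count_replicate]
    rw [if_neg (by simp; omega), ih (k + 1) i (by omega)]

theorem pvBlocks_count : ∀ (cs : List Int) (k : Int) (j : Nat) (h : j < cs.length),
    (pvBlocks k cs).count (k + j) = cs[j].toNat := by
  intro cs
  induction cs with
  | nil => intro k j h; simp at h
  | cons c cs ih =>
    intro k j h
    cases j with
    | zero =>
      simp only [Nat.cast_zero, add_zero, pvBlocks, List.count_append, List.count_replicate,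
        List.getElem_cons_zero]
      rw [if_pos (by simp), pvBlocks_count_lt cs (k + 1) k (by omega)]
      omega
    | succ j =>
      simp only [pvBlocks, List.count_append, List.count_replicate, List.getElem_cons_succ]
      rw [if_neg (by simp; omega)]
      have := ih (k + 1) j (by simpa using h)
      rw [show (k + 1) + (j : Int) = k + ((j : Nat) + 1 : Nat) from by push_cast; ring] at this
      omega

-- ===== VERDICT (by name: the statement is the Claim_ definition above) =====
theorem adventureCamp_spec : Claim_equal_adventureCamp := by
  unfold Claim_equal_adventureCamp
  intro e _ hpre
  unfold Spec_adventureCamp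
  obtain ⟨row0, rest, rfl⟩ : ∃ a l, e = a :: l := by
    cases e with
    | nil => exact absurd rfl hpre
    | cons a l => exact ⟨a, l, rfl⟩
  -- A side
  have hA : adventureCamp (row0 :: rest)
      = (pvScan (pvCnts ((advSplit row0).foldl (fun c v => PySem.Set.add c v) PySem.Set.empty) rest) 1 (0, -1)).2 := by
    have hget : PySem.List.pyGet? (row0 :: rest) 0 = some row0 := by
      simp [PySem.List.pyGet?, PySem.List.pyIdx?]
    unfold adventureCamp
    rw [hget]
    show ((PySem.List.pyRange 1 ((row0 :: rest).length : Int)).foldl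
        (fun (st : PySem.Set String × Int × Int) i =>
          let r := (advSplit (PySem.List.pyGetD (row0 :: rest) i "")).foldl advInner (0, st.1)
          if r.1 > st.2.1 then (r.2, r.1, i) else (r.2, st.2.1, st.2.2))
        ((advSplit row0).foldl (fun c v => PySem.Set.add c v) PySem.Set.empty, 0, -1)).2.2 = _
    have := pvRangeEnum
      (fun (acc : PySem.Set String × Int × Int) (i : Int) (row : String) =>
        let r := (advSplit row).foldl advInner (0, acc.1)
        if r.1 > acc.2.1 then (r.2, r.1, i) else (r.2, acc.2.1, acc.2.2))
      rest 1 (row0 :: rest) (by simp)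
      ((advSplit row0).foldl (fun c v => PySem.Set.add c v) PySem.Set.empty, 0, -1)
    simp only [Nat.cast_one] at this
    rw [this, pvOuterA]
  rw [hA]
  -- B side
  obtain ⟨nk0, hb1, hb2⟩ := pvRow0 (advSplit row0) PySem.Dict.empty PySem.Set.empty (by simp)
  set cache0 : PySem.Set String := (advSplit row0).foldl (fun c v => PySem.Set.add c v) PySem.Set.empty with hcache0
  show _ = ((PySem.List.pyRange 1 (((row0 :: rest).length : Nat) : Int)).foldl
      (fun (bp : Int × Int) i =>
        let c := (((PySem.List.enumerate (row0 :: rest)).foldl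
          (fun d p => (advSplit p.2).foldl
            (fun d tok => if (tok != "") && !(d.contains tok) then d.insert tok p.1 else d) d)
          PySem.Dict.empty).values.foldl
            (fun c idx => c.insert idx (c.getD idx 0 + 1)) PySem.Dict.empty).getD i 0
        if c > bp.1 then (c, i) else bp) (0, -1)).2
  -- the dict after row 0
  have hfirst : (PySem.List.enumerate (row0 :: rest)).foldl
      (fun d p => (advSplit p.2).foldl
        (fun d tok => if (tok != "") && !(d.contains tok) then d.insert tok p.1 else d) d)
      PySem.Dict.empty
      = (PySem.List.enumerate rest 1).foldl
        (fun d p => (advSplit p.2).foldl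
          (fun d tok => if (tok != "") && !(d.contains tok) then d.insert tok p.1 else d) d)
        ((advSplit row0).foldl (fun d tok => if (tok != "") && !(d.contains tok) then d.insert tok (0 : Int) else d) PySem.Dict.empty) := by
    rw [PySem.List.enumerate_cons, List.foldl_cons]
    norm_num
  rw [hfirst]
  set d0 : PySem.Dict String Int :=
    (advSplit row0).foldl (fun d tok => if (tok != "") && !(d.contains tok) then d.insert tok (0 : Int) else d) PySem.Dict.empty with hd0
  have hvals : ((PySem.List.enumerate rest 1).foldl
      (fun d p => (advSplit p.2).foldl
        (fun d tok => if (tok != "") && !(d.contains tok) then d.insert tok p.1 else d) d) d0).values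
      = d0.values ++ pvBlocks 1 (pvCnts cache0 rest) :=
    pvOuterB rest 1 d0 cache0 hb2
  have hd0vals : d0.values = List.replicate nk0.length 0 := by
    show d0.items.map (·.2) = _
    rw [hb1]
    rw [List.map_append, List.map_map,
      show ((fun (x : String × Int) => x.2) ∘ fun t => (t, (0 : Int))) = fun _ => (0 : Int) from rfl,
      show List.map (fun (x : String × Int) => x.2) PySem.Dict.empty.items = ([] : List Int) from rfl,
      List.nil_append]
    simp
  -- per-index value of counts
  set cs : List Int := pvCnts cache0 rest with hcs
  have hlen : (((row0 :: rest).length : Nat) : Int) = 1 + (cs.length : Int) := by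
    rw [hcs, pvCnts_length]
    simp
    omega
  rw [hlen]
  rw [PySem.Dict.foldl_insert_getD_add_one_eq_counter]
  have := pvScanFold cs 1 (0, -1)
    (fun i => (PySem.Dict.counter ((PySem.List.enumerate rest 1).foldl
      (fun d p => (advSplit p.2).foldl
        (fun d tok => if (tok != "") && !(d.contains tok) then d.insert tok p.1 else d) d) d0).values).getD i 0)
    (by
      intro j hj
      beta_reduce
      rw [PySem.Dict.getD_counter, hvals, hd0vals]
      rw [List.count_append, List.count_replicate]
      rw [if_neg (by simp; omega), pvBlocks_count cs 1 j hj]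
      have hmem2 : cs[j] ∈ pvCnts cache0 rest := by rw [← hcs]; exact List.getElem_mem hj
      have h0 := pvCnts_nonneg rest cache0 _ hmem2
      omega)
  rw [this]
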